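-- pv_equiv track=rewrite | github.com/mon-martins/dbc2h_converter | dbc2h_converter.py | ones_bits_mask
-- ===== SOURCE A (Python) =====
-- def ones_bits_mask(num_of_one_bits:int, init_pos:int = 0):
--     mask = "0b"
--     bits = [7,6,5,4,3,2,1,0]
--     for i in bits:
--         if i < init_pos:
--             mask += "0"
--         elif i > init_pos+num_of_one_bits-1:
--             mask += "0"
--         else:
--             mask += "1"
--     return mask
-- ===== SOURCE B (Python) =====
-- def ones_bits_mask(num_of_one_bits: int, init_pos: int = 0):
--     lo = max(init_pos, 0)
--     hi = min(init_pos + num_of_one_bits - 1, 7)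
--     count = max(hi - lo + 1, 0)
--     lead = 7 - hi if count > 0 else 8
--     return "0b" + "0" * lead + "1" * count + "0" * (8 - lead - count)
-- ===== Notes on version B (the rewrite author's own statement) =====
-- stated objective: simpler
-- what changed: Replaces A's per-bit loop (testing each of the 8 bit positions against two inequalities and appending a char) with closed-form min/max arithmetic computing the one-run's clamped endpoints, then concatenating three replicated segments '0'*lead + '1'*count + '0'*trail.
import Mathlib
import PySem

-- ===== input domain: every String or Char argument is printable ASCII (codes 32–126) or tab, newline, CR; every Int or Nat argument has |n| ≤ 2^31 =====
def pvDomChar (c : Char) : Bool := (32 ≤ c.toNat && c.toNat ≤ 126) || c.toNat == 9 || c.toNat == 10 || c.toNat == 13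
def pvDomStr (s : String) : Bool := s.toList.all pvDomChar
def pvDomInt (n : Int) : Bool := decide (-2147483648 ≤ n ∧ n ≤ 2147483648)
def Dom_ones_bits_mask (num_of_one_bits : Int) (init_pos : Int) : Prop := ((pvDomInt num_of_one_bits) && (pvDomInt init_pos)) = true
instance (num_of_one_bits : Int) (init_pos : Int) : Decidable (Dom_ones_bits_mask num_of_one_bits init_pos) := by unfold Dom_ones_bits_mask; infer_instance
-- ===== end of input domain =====

-- B replaces A's per-bit loop with closed-form min/max arithmetic for the three
-- segments (leading zeros, ones, trailing zeros) of the mask; objective: simpler.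

-- ===== PORT A =====
-- literal transliteration: fold over the bit list [7..0], appending one char per bit
def ones_bits_mask (num_of_one_bits : Int) (init_pos : Int) : String :=
  ([7, 6, 5, 4, 3, 2, 1, 0] : List Int).foldl (fun mask i =>
    if i < init_pos then mask ++ "0"
    else if init_pos + num_of_one_bits - 1 < i then mask ++ "0"
    else mask ++ "1") "0b"

-- ===== PORT B =====
-- transliteration of Source B; Python's "0"*k with k ≥ 0 is List.replicate k.toNat
-- (the computed lengths are never negative, so .toNat is exact)
def ones_bits_mask_alt (num_of_one_bits : Int) (init_pos : Int) : String :=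
  let lo := max init_pos 0
  let hi := min (init_pos + num_of_one_bits - 1) 7
  let count := max (hi - lo + 1) 0
  let lead := if count > 0 then 7 - hi else 8
  "0b" ++ String.ofList (List.replicate lead.toNat '0')
       ++ String.ofList (List.replicate count.toNat '1')
       ++ String.ofList (List.replicate (8 - lead - count).toNat '0')

-- ===== PRECONDITION & SPEC =====
def Spec_ones_bits_mask (num_of_one_bits : Int) (init_pos : Int) (out : String) : Prop := out = ones_bits_mask_alt num_of_one_bits init_pos
instance (num_of_one_bits : Int) (init_pos : Int) (out : String) : Decidable (Spec_ones_bits_mask num_of_one_bits init_pos out) := by unfold Spec_ones_bits_mask; infer_instance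

-- ===== CLAIM (what is proved, stated in full; the proofs are below) =====
def Claim_equal_ones_bits_mask : Prop := ∀ (num_of_one_bits : Int) (init_pos : Int), Dom_ones_bits_mask num_of_one_bits init_pos → Spec_ones_bits_mask num_of_one_bits init_pos (ones_bits_mask num_of_one_bits init_pos)

-- ===== LEMMAS AND PROOFS =====

-- one mask character as a function of the clamped run endpoints p ≤ · < q
def chF (p q i : Int) : String := if i < p then "0" else if q ≤ i then "0" else "1"

-- the whole mask as a function of the clamped endpoints
def maskF (p q : Int) : String :=
  "0b" ++ chF p q 7 ++ chF p q 6 ++ chF p q 5 ++ chF p q 4 ++ chF p q 3 ++ chF p q 2 ++ chF p q 1 ++ chF p q 0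

-- one character of A's loop body
def chA (n ip i : Int) : String := if i < ip then "0" else if ip + n - 1 < i then "0" else "1"

theorem stepA (n ip : Int) (m : String) (i : Int) :
    (if i < ip then m ++ "0" else if ip + n - 1 < i then m ++ "0" else m ++ "1") = m ++ chA n ip i := by
  unfold chA; split_ifs <;> rfl

theorem chA_eq (n ip i : Int) (h0 : 0 ≤ i) (h7 : i ≤ 7) :
    chA n ip i = chF (max 0 (min 8 ip)) (max 0 (min 8 (ip + n))) i := by
  unfold chA chF; split_ifs <;> first | rfl | omega

theorem A_eq_maskF (n ip : Int) :
    ones_bits_mask n ip = maskF (max 0 (min 8 ip)) (max 0 (min 8 (ip + n))) := by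
  simp only [ones_bits_mask, List.foldl, stepA]
  rw [chA_eq n ip 7 (by norm_num) (by norm_num), chA_eq n ip 6 (by norm_num) (by norm_num),
      chA_eq n ip 5 (by norm_num) (by norm_num), chA_eq n ip 4 (by norm_num) (by norm_num),
      chA_eq n ip 3 (by norm_num) (by norm_num), chA_eq n ip 2 (by norm_num) (by norm_num),
      chA_eq n ip 1 (by norm_num) (by norm_num), chA_eq n ip 0 (by norm_num) (by norm_num)]
  rfl

theorem maskF_zero (p q : Int) (hp0 : 0 ≤ p) (hp8 : p ≤ 8) (hq0 : 0 ≤ q) (hq8 : q ≤ 8)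
    (h : q ≤ p) : maskF p q = "0b00000000" := by
  interval_cases p <;> interval_cases q <;> rfl

theorem maskF_run (p q : Int) (hp0 : 0 ≤ p) (hq8 : q ≤ 8) (h : p < q) :
    "0b" ++ String.ofList (List.replicate (8 - q).toNat '0')
         ++ String.ofList (List.replicate (q - p).toNat '1')
         ++ String.ofList (List.replicate p.toNat '0') = maskF p q := by
  have hp8 : p ≤ 7 := by omega
  have hq0 : 1 ≤ q := by omega
  interval_cases p <;> interval_cases q <;> rfl

theorem B_eq_maskF (n ip : Int) :
    ones_bits_mask_alt n ip = maskF (max 0 (min 8 ip)) (max 0 (min 8 (ip + n))) := by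
  have e : ones_bits_mask_alt n ip =
      "0b" ++ String.ofList (List.replicate (if max (min (ip + n - 1) 7 - max ip 0 + 1) 0 > 0
                  then 7 - min (ip + n - 1) 7 else 8).toNat '0')
           ++ String.ofList (List.replicate (max (min (ip + n - 1) 7 - max ip 0 + 1) 0).toNat '1')
           ++ String.ofList (List.replicate (8 - (if max (min (ip + n - 1) 7 - max ip 0 + 1) 0 > 0
                  then 7 - min (ip + n - 1) 7 else 8) - max (min (ip + n - 1) 7 - max ip 0 + 1) 0).toNat '0') := rfl
  rw [e]
  by_cases h : max 0 (min 8 (ip + n)) ≤ max 0 (min 8 ip)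
  · have hc : max (min (ip + n - 1) 7 - max ip 0 + 1) 0 = 0 := by omega
    rw [hc, maskF_zero _ _ (by omega) (by omega) (by omega) (by omega) h]
    rfl
  · push Not at h
    have hc : max (min (ip + n - 1) 7 - max ip 0 + 1) 0 = max 0 (min 8 (ip + n)) - max 0 (min 8 ip) := by omega
    have hl : 7 - min (ip + n - 1) 7 = 8 - max 0 (min 8 (ip + n)) := by omega
    rw [hc, if_pos (by omega), hl,
        show 8 - (8 - max 0 (min 8 (ip + n))) - (max 0 (min 8 (ip + n)) - max 0 (min 8 ip)) =
          max 0 (min 8 ip) from by omega]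
    exact maskF_run _ _ (by omega) (by omega) h

-- ===== VERDICT (by name: the statement is the Claim_ definition above) =====
theorem ones_bits_mask_spec : Claim_equal_ones_bits_mask := by
  intro n ip _
  unfold Spec_ones_bits_mask
  rw [A_eq_maskF, B_eq_maskF]
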